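-- pv_equiv track=rewrite | github.com/domingo2000/capstone-github-assignment | main.py | top_10_days_with_more_tweets
-- ===== SOURCE A (Python) =====
-- def top_10_days_with_more_tweets(tweets):
--   counter = {}
--   for tweet in tweets:
--     day = tweet["date"][0:10]
--
--     if day not in counter:
--       counter[day] = 0
--
--     counter[day] += 1
--
--   ordered_days = dict(sorted(counter.items(), key=lambda item: item[1]))
--   return list(ordered_days.keys())[0:10]
-- ===== SOURCE B (Python) =====
-- def top_10_days_with_more_tweets(tweets):
--     counter = {}
--     for tweet in tweets:
--         day = tweet["date"][0:10]
--         counter[day] = counter.get(day, 0) + 1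
--     buckets = {}
--     for day, n in counter.items():
--         buckets.setdefault(n, []).append(day)
--     result = []
--     for n in sorted(buckets):
--         result = result + buckets[n]
--         if len(result) >= 10:
--             break
--     return result[0:10]
-- ===== Notes on version B (the rewrite author's own statement) =====
-- stated objective: alternative
-- what changed: Instead of sorting all (day,count) items by count and slicing, B inverts the counter into a count->days bucket index (insertion order preserved), walks the distinct counts in ascending order and stops as soon as 10 days are collected.
import Mathlib
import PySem

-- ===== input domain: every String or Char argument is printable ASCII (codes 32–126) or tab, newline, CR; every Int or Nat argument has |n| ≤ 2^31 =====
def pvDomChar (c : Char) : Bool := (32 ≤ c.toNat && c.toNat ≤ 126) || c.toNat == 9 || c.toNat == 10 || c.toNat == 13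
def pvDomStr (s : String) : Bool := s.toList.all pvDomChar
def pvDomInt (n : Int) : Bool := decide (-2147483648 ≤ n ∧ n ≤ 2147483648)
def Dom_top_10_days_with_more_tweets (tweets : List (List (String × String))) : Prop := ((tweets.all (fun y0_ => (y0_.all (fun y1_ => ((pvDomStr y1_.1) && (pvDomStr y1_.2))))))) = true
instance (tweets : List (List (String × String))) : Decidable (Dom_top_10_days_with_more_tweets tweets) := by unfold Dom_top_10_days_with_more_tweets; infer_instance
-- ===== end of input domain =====

-- B groups the counted days into count→days buckets and walks the distinct counts in ascending
-- order with an early stop once 10 days are collected, instead of sorting all (day, count) items.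

-- ===== PORT A =====
-- tweet["date"][0:10]; Pre_ guarantees the "date" key is present (Python raises KeyError
-- otherwise), so the `.getD ""` default is never used on admitted inputs.
def pvDay (tweet : List (String × String)) : String :=
  PySem.Str.slice (((PySem.Dict.mk tweet).get? "date").getD "") (some 0) (some 10)

def top_10_days_with_more_tweets (tweets : List (List (String × String))) : List String :=
  let counter : PySem.Dict String Int := tweets.foldl (fun counter tweet =>
    let day := pvDay tweet
    let counter := if counter.contains day = false then counter.insert day (0 : Int) else counter
    counter.insert day (counter.getD day 0 + 1)) PySem.Dict.empty
  let ordered_days : PySem.Dict String Int :=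
    (PySem.List.sorted counter.items (fun item => item.2) false).foldl
      (fun d kv => d.insert kv.1 kv.2) PySem.Dict.empty
  PySem.List.slice ordered_days.keys (some 0) (some 10)

-- ===== PORT B =====
-- the `for n in sorted(buckets): result = result + buckets[n]; if len(result) >= 10: break` loop
def pvCollect (buckets : PySem.Dict Int (List String)) : List Int → List String → List String
  | [], result => result
  | n :: rest, result =>
    let result := result ++ buckets.getD n []
    if 10 ≤ result.length then result else pvCollect buckets rest result

def top_10_days_with_more_tweets_alt (tweets : List (List (String × String))) : List String :=
  let counter : PySem.Dict String Int := tweets.foldl (fun counter tweet =>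
    let day := pvDay tweet
    counter.insert day (counter.getD day 0 + 1)) PySem.Dict.empty
  let buckets : PySem.Dict Int (List String) := counter.items.foldl
    (fun b p => b.modify p.2 [] (fun l => l ++ [p.1])) PySem.Dict.empty
  let result := pvCollect buckets (PySem.List.sorted buckets.keys (fun n => n) false) []
  PySem.List.slice result (some 0) (some 10)

-- ===== PRECONDITION & SPEC =====
-- Pre_ excludes exactly the inputs on which the Python A raises KeyError: a tweet dict
-- without the "date" key (B raises there too).
def Pre_top_10_days_with_more_tweets (tweets : List (List (String × String))) : Prop :=
  (tweets.all (fun tweet => (PySem.Dict.mk tweet).contains "date")) = true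
instance (tweets : List (List (String × String))) : Decidable (Pre_top_10_days_with_more_tweets tweets) := by unfold Pre_top_10_days_with_more_tweets; infer_instance
def pvWitness_top_10_days_with_more_tweets : (List (List (String × String))) :=
  [[("date", "2020-01-01 10:00:00")], [("date", "2020-01-02 09:30:00")]]

def Spec_top_10_days_with_more_tweets (tweets : List (List (String × String))) (out : List String) : Prop := out = top_10_days_with_more_tweets_alt tweets
instance (tweets : List (List (String × String))) (out : List String) : Decidable (Spec_top_10_days_with_more_tweets tweets out) := by unfold Spec_top_10_days_with_more_tweets; infer_instance

-- ===== CLAIM (what is proved, stated in full; the proofs are below) =====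
def Claim_equal_top_10_days_with_more_tweets : Prop := ∀ (tweets : List (List (String × String))), Dom_top_10_days_with_more_tweets tweets → Pre_top_10_days_with_more_tweets tweets → Spec_top_10_days_with_more_tweets tweets (top_10_days_with_more_tweets tweets)

-- ===== LEMMAS AND PROOFS =====

-- A's counter update (setdefault-to-0 then += 1) equals B's single insert of get(day, 0) + 1.
theorem pv_counter_step (c : PySem.Dict String Int) (day : String) :
    (let c1 := if c.contains day = false then c.insert day (0 : Int) else c
     c1.insert day (c1.getD day 0 + 1)) = c.insert day (c.getD day 0 + 1) := by
  by_cases h : c.contains day = false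
  · show (let c1 := if c.contains day = false then c.insert day (0 : Int) else c
          c1.insert day (c1.getD day 0 + 1)) = _
    rw [if_pos h]
    show (c.insert day 0).insert day ((c.insert day 0).getD day 0 + 1) = _
    rw [PySem.Dict.getD_insert_self, PySem.Dict.insert_insert_self,
        PySem.Dict.getD_of_not_contains c 0 h]
  · simp [h]

theorem pv_counter_eq (tweets : List (List (String × String))) :
    tweets.foldl (fun counter tweet =>
      let day := pvDay tweet
      let counter := if counter.contains day = false then counter.insert day (0 : Int) else counter
      counter.insert day (counter.getD day 0 + 1)) PySem.Dict.empty
    = tweets.foldl (fun counter tweet =>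
      counter.insert (pvDay tweet) (counter.getD (pvDay tweet) 0 + 1)) PySem.Dict.empty := by
  apply PySem.List.foldl_congr_mem
  intro acc x _
  exact pv_counter_step acc (pvDay x)

-- inserting into a key-sorted list, then filtering to one key value: the new element lands last
theorem pv_insertBy_filter (x : String × Int) (ys : List (String × Int)) (c : Int)
    (hys : ys.Pairwise (fun a b => a.2 ≤ b.2)) :
    (PySem.List.insertBy (fun a b => decide (a.2 < b.2)) x ys).filter (fun y => y.2 == c)
      = if x.2 == c then ys.filter (fun y => y.2 == c) ++ [x]
        else ys.filter (fun y => y.2 == c) := by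
  induction ys with
  | nil => by_cases hxc : x.2 = c <;> simp [PySem.List.insertBy, hxc]
  | cons y ys ih =>
    rw [List.pairwise_cons] at hys
    obtain ⟨hy, hys'⟩ := hys
    show (if decide (x.2 < y.2) = true then x :: y :: ys
          else y :: PySem.List.insertBy (fun a b => decide (a.2 < b.2)) x ys).filter
            (fun y => y.2 == c) = _
    by_cases hlt : x.2 < y.2
    · rw [if_pos (by simpa using hlt)]
      by_cases hxc : x.2 = c
      · have hnil : (y :: ys).filter (fun y => y.2 == c) = [] := by
          rw [List.filter_eq_nil_iff]
          intro a ha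
          rcases List.mem_cons.1 ha with rfl | ha'
          · simp; omega
          · have := hy a ha'; simp; omega
        simp [hxc, hnil]
      · simp only [List.filter_cons]
        have : (x.2 == c) = false := by simpa using hxc
        simp [this]
    · rw [if_neg (by simpa using hlt)]
      simp only [List.filter_cons, ih hys']
      by_cases hxc : x.2 = c <;> by_cases hyc : y.2 = c <;>
        simp [hxc, hyc]

-- STABILITY: filtering the stable sort to one key value gives the original filter
theorem pv_sorted_filter (l : List (String × Int)) (c : Int) :
    (PySem.List.sorted l (fun p => p.2) false).filter (fun y => y.2 == c)
      = l.filter (fun y => y.2 == c) := by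
  induction l using List.reverseRecOn with
  | nil => simp [PySem.List.sorted]
  | append_singleton l x ih =>
    have hstep : PySem.List.sorted (l ++ [x]) (fun p => p.2) false
        = PySem.List.insertBy (fun a b => decide (a.2 < b.2)) x
            (PySem.List.sorted l (fun p => p.2) false) := by
      rw [PySem.List.sorted_eq_foldl_insertBy, PySem.List.sorted_eq_foldl_insertBy,
          List.foldl_append]
      rfl
    rw [hstep, pv_insertBy_filter _ _ _ (PySem.List.sorted_pairwise l (fun p => p.2)), ih,
        List.filter_append]
    by_cases hxc : x.2 = c <;> simp [hxc]

-- a key-sorted list whose minimal key value is c splits as (elements with key c) ++ (the rest)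
theorem pv_minSplit (L : List (String × Int)) (c : Int)
    (hL : L.Pairwise (fun a b => a.2 ≤ b.2)) (hmin : ∀ y ∈ L, c ≤ y.2) :
    L = L.filter (fun y => y.2 == c) ++ L.filter (fun y => !(y.2 == c)) := by
  induction L with
  | nil => simp
  | cons x L' ih =>
    rw [List.pairwise_cons] at hL
    obtain ⟨hx, hL'⟩ := hL
    by_cases hxc : x.2 = c
    · have hmin' : ∀ y ∈ L', c ≤ y.2 := fun y hy => hxc ▸ hx y hy
      simp only [List.filter_cons, hxc]
      simpa using ih hL' hmin'
    · have hcx : c < x.2 := lt_of_le_of_ne (hmin x (List.mem_cons_self)) (Ne.symm hxc)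
      have hne : ∀ y ∈ x :: L', ¬ (y.2 = c) := by
        intro y hy
        rcases List.mem_cons.1 hy with rfl | hy'
        · exact hxc
        · have := hx y hy'; omega
      have h1 : (x :: L').filter (fun y => y.2 == c) = [] := by
        rw [List.filter_eq_nil_iff]; intro a ha; simpa using hne a ha
      have h2 : (x :: L').filter (fun y => !(y.2 == c)) = x :: L' := by
        rw [List.filter_eq_self]; intro a ha; simpa using hne a ha
      rw [h1, h2, List.nil_append]

-- a key-sorted list is the concatenation of its key-value groups, in ascending key order
theorem pvW (C : List Int) (L : List (String × Int))
    (hL : L.Pairwise (fun a b => a.2 ≤ b.2)) (hC : C.Pairwise (· < ·))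
    (hmem : ∀ c, c ∈ C ↔ c ∈ L.map (fun y => y.2)) :
    L = C.flatMap (fun c => L.filter (fun y => y.2 == c)) := by
  induction C generalizing L with
  | nil =>
    cases L with
    | nil => simp
    | cons x L' =>
      exfalso
      exact (List.not_mem_nil) ((hmem x.2).2 (by simp))
  | cons c C' ih =>
    rw [List.pairwise_cons] at hC
    obtain ⟨hcC', hC'⟩ := hC
    have hmin : ∀ y ∈ L, c ≤ y.2 := by
      intro y hy
      have : y.2 ∈ c :: C' := (hmem y.2).2 (List.mem_map_of_mem hy)
      rcases List.mem_cons.1 this with h | h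
      · omega
      · exact le_of_lt (hcC' _ h)
    have hsplit := pv_minSplit L c hL hmin
    set N := L.filter (fun y => !(y.2 == c)) with hN
    have hfilt : ∀ c' ∈ C', L.filter (fun y => y.2 == c') = N.filter (fun y => y.2 == c') := by
      intro c' hc'
      have hcc' : c ≠ c' := ne_of_lt (hcC' _ hc')
      rw [hN, List.filter_filter]
      apply List.filter_congr
      intro y _
      by_cases h : y.2 = c' <;> simp [h, hcc'.symm]
    have hNL : N = C'.flatMap (fun c' => N.filter (fun y => y.2 == c')) := by
      apply ih N (hL.filter _) hC'
      intro c'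
      constructor
      · intro hc'
        have : c' ∈ L.map (fun y => y.2) := (hmem c').1 (List.mem_cons_of_mem _ hc')
        obtain ⟨y, hy, hyc⟩ := List.mem_map.1 this
        refine List.mem_map.2 ⟨y, ?_, hyc⟩
        rw [hN, List.mem_filter]
        have hcc' : c ≠ c' := ne_of_lt (hcC' _ hc')
        exact ⟨hy, by simp [hyc, hcc'.symm]⟩
      · intro hc'
        obtain ⟨y, hy, hyc⟩ := List.mem_map.1 hc'
        rw [hN, List.mem_filter] at hy
        obtain ⟨hyL, hyne⟩ := hy
        have : y.2 ∈ c :: C' := (hmem y.2).2 (List.mem_map_of_mem hyL)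
        rcases List.mem_cons.1 this with h | h
        · exfalso; rw [h] at hyne; simp at hyne
        · rw [← hyc]; exact h
    calc L = L.filter (fun y => y.2 == c) ++ N := hsplit
    _ = L.filter (fun y => y.2 == c) ++ C'.flatMap (fun c' => N.filter (fun y => y.2 == c')) := by rw [← hNL]
    _ = L.filter (fun y => y.2 == c) ++ C'.flatMap (fun c' => L.filter (fun y => y.2 == c')) := by
        congr 1
        exact (List.flatMap_congr (fun c' hc' => (hfilt c' hc').symm))
    _ = (c :: C').flatMap (fun c' => L.filter (fun y => y.2 == c')) := by rw [List.flatMap_cons]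

-- the early-`break` walk, truncated to 10, equals the full concatenation truncated to 10
theorem pv_collect_take (b : PySem.Dict Int (List String)) (ks : List Int) (res : List String) :
    (pvCollect b ks res).take 10 = (res ++ ks.flatMap (fun n => b.getD n [])).take 10 := by
  induction ks generalizing res with
  | nil => simp [pvCollect]
  | cons n rest ih =>
    show (if 10 ≤ (res ++ b.getD n []).length then (res ++ b.getD n [])
          else pvCollect b rest (res ++ b.getD n [])).take 10 = _
    rw [List.flatMap_cons, ← List.append_assoc]
    by_cases h : 10 ≤ (res ++ b.getD n []).length
    · rw [if_pos h, List.take_append_of_le_length h]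
    · rw [if_neg h, ih]

theorem pv_slice_take (xs : List String) : PySem.List.slice xs (some 0) (some 10) = xs.take 10 := by
  simp [pysem]

theorem pv_main (tweets : List (List (String × String))) :
    top_10_days_with_more_tweets tweets = top_10_days_with_more_tweets_alt tweets := by
  unfold top_10_days_with_more_tweets top_10_days_with_more_tweets_alt
  rw [pv_counter_eq]
  set c : PySem.Dict String Int := tweets.foldl (fun counter tweet =>
      counter.insert (pvDay tweet) (counter.getD (pvDay tweet) 0 + 1)) PySem.Dict.empty with hc
  have hkeys_nodup : c.keys.Nodup := by
    rw [hc]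
    exact PySem.Dict.nodup_keys_foldl_insert_key tweets pvDay _ PySem.Dict.empty (by simp)
  set L := PySem.List.sorted c.items (fun item => item.2) false with hL
  -- A side: the rebuilt dict's keys are L's first components
  have hfst_nodup : (L.map (fun y => y.1)).Nodup := by
    have hperm : (L.map (fun y => y.1)).Perm (c.items.map (fun y => y.1)) :=
      (PySem.List.sorted_perm c.items (fun item => item.2) false).map _
    exact hperm.nodup_iff.2 hkeys_nodup
  have hA : (L.foldl (fun d kv => d.insert kv.1 kv.2) PySem.Dict.empty).keys
      = L.map (fun y => y.1) := by
    have hitems := PySem.Dict.items_foldl_insert_fresh L (fun y => y.1) (fun y => y.2)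
      PySem.Dict.empty (by intro a _; simp [PySem.Dict.contains_empty]) hfst_nodup
    simp only [PySem.Dict.keys, hitems]
    simp
    rfl
  -- B side: the buckets index
  set buckets : PySem.Dict Int (List String) := c.items.foldl
    (fun b p => b.modify p.2 [] (fun l => l ++ [p.1])) PySem.Dict.empty with hbuckets
  have hbmap : buckets = (c.items.map Prod.swap).foldl
      (fun d p => d.modify p.1 [] (fun l => l ++ [p.2])) PySem.Dict.empty := by
    rw [List.foldl_map]
    rfl
  have hbkeys : buckets.keys = PySem.Set.ofList (c.items.map (fun y => y.2)) := by
    rw [hbuckets, PySem.Dict.keys_foldl_modify_key c.items (fun p => p.2) [] _ PySem.Dict.empty]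
    show PySem.Set.update [] _ = _
    rw [PySem.Set.update_nil_left]
  have hgetD : ∀ n : Int, buckets.getD n []
      = (c.items.filter (fun y => y.2 == n)).map (fun y => y.1) := by
    intro n
    rw [hbmap, PySem.Dict.getD_foldl_modify_append]
    simp [List.filter_map, Function.comp_def, PySem.Dict.getD_empty, List.map_map]
  set C := PySem.List.sorted buckets.keys (fun n => n) false with hCdef
  have hC : C.Pairwise (· < ·) := by
    rw [hCdef, hbkeys]
    exact PySem.List.sorted_ofList_pairwise_lt _
  have hmem : ∀ n : Int, n ∈ C ↔ n ∈ L.map (fun y => y.2) := by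
    intro n
    rw [hCdef, hbkeys]
    simp only [PySem.List.mem_sorted, PySem.Set.mem_ofList, List.mem_map, hL]
  have hW := pvW C L (by rw [hL]; exact PySem.List.sorted_pairwise _ _) hC hmem
  rw [pv_slice_take, pv_slice_take, hA, pv_collect_take, List.nil_append, hW, List.map_flatMap]
  apply congrArg (List.take 10)
  apply List.flatMap_congr
  intro n _
  rw [hgetD n]
  congr 1
  rw [hL]
  exact pv_sorted_filter c.items n

-- ===== VERDICT (by name: the statement is the Claim_ definition above) =====
theorem top_10_days_with_more_tweets_spec : Claim_equal_top_10_days_with_more_tweets := by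
  intro tweets _ _
  exact pv_main tweets
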